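-- pv_equiv track=rewrite | github.com/GBLUIUC/wordle-solver | wordle.py | generate_char_candidates
-- ===== SOURCE A (Python) =====
-- def generate_char_candidates(sol_space, unguessed):
--     freq = {}
--     for char in unguessed:
--         freq[char] = 0
--         for word in sol_space:
--             if char in word:
--                 freq[char] += 1
--
--     char_cand = sorted(freq, key=freq.get, reverse=True)
--     return char_cand
-- ===== SOURCE B (Python) =====
-- def generate_char_candidates(sol_space, unguessed):
--     # Compress the solution space into a multiplicity map (one pass), then
--     # count each deduplicated char over the distinct words only, weighted.
--     mult = {}
--     for w in sol_space:
--         mult[w] = mult.get(w, 0) + 1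
--     keys = list(dict.fromkeys(unguessed))
--     freq = {}
--     for ch in keys:
--         freq[ch] = sum(m for w, m in mult.items() if ch in w)
--     return sorted(keys, key=freq.get, reverse=True)
-- ===== Notes on version B (the rewrite author's own statement) =====
-- stated objective: faster
-- what changed: B first compresses sol_space into a word->multiplicity map in one pass and dedups the unguessed keys, then computes each key's count as a multiplicity-weighted sum over the DISTINCT words only and sorts the dedup'd key list; A rescans the full sol_space per unguessed entry with an incrementally mutated dict counter.
import Mathlib
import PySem

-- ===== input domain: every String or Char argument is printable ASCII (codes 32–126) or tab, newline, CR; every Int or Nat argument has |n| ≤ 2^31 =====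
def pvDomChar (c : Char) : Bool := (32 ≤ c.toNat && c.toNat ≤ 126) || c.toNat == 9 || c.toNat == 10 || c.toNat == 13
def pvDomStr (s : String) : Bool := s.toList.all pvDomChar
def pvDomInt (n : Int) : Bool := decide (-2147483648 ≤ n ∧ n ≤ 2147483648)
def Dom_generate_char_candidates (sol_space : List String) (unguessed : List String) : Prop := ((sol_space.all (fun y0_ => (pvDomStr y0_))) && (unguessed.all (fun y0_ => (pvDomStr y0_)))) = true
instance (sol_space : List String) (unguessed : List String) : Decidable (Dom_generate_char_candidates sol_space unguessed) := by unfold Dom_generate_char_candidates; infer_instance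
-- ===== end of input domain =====

-- B compresses sol_space into a word->multiplicity map once and counts each dedup'd key
-- over the distinct words only (weighted by multiplicity); return value identical.
-- ===== PORT A =====
def generate_char_candidates (sol_space : List String) (unguessed : List String) : List String :=
  let freq : PySem.Dict String Int :=
    unguessed.foldl (fun d char =>
      sol_space.foldl
        (fun d word => if PySem.Str.isIn char word then d.modify char 0 (· + 1) else d)
        (d.insert char 0))
      PySem.Dict.empty
  PySem.List.sorted freq.keys (fun c => freq.getD c 0) true

-- ===== PORT B =====
def generate_char_candidates_alt (sol_space : List String) (unguessed : List String) : List String :=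
  let mult : PySem.Dict String Int :=
    sol_space.foldl (fun d w => d.insert w (d.getD w 0 + 1)) PySem.Dict.empty
  let keys := PySem.List.dedup unguessed
  let freq : PySem.Dict String Int :=
    keys.foldl (fun d ch =>
      d.insert ch
        (mult.items.foldl (fun acc p => if PySem.Str.isIn ch p.1 then acc + p.2 else acc) 0))
      PySem.Dict.empty
  PySem.List.sorted keys (fun c => freq.getD c 0) true

-- ===== PRECONDITION & SPEC =====
def Spec_generate_char_candidates (sol_space : List String) (unguessed : List String) (out : List String) : Prop := out = generate_char_candidates_alt sol_space unguessed
instance (sol_space : List String) (unguessed : List String) (out : List String) : Decidable (Spec_generate_char_candidates sol_space unguessed out) := by unfold Spec_generate_char_candidates; infer_instance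

-- ===== CLAIM (what is proved, stated in full; the proofs are below) =====
def Claim_equal_generate_char_candidates : Prop := ∀ (sol_space : List String) (unguessed : List String), Dom_generate_char_candidates sol_space unguessed → Spec_generate_char_candidates sol_space unguessed (generate_char_candidates sol_space unguessed)

-- ===== LEMMAS AND PROOFS =====

-- number of words of `ws` containing `c`
def pvCnt (ws : List String) (c : String) : Int :=
  ((ws.filter (fun w => PySem.Str.isIn c w)).length : Int)

-- A's inner loop: counts `ch` into the dict, leaves other keys alone
theorem pvA_inner_getD (ws : List String) (ch : String) (d : PySem.Dict String Int) (c : String) :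
    (ws.foldl (fun d word => if PySem.Str.isIn ch word then d.modify ch 0 (· + 1) else d) d).getD c 0
      = if c = ch then d.getD ch 0 + pvCnt ws ch else d.getD c 0 := by
  induction ws generalizing d with
  | nil =>
    by_cases h : c = ch
    · subst h; simp [pvCnt]
    · simp [h]
  | cons w t ih =>
    rw [List.foldl_cons, ih]
    by_cases hin : PySem.Str.isIn ch w = true
    · have hcnt : pvCnt (w :: t) ch = pvCnt t ch + 1 := by
        simp only [pvCnt, List.filter_cons, hin, if_true, List.length_cons]
        push_cast; ring
      rw [if_pos hin]
      by_cases he : c = ch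
      · subst he
        rw [if_pos rfl, if_pos rfl, hcnt, PySem.Dict.getD_modify, if_pos rfl]
        ring
      · rw [if_neg he, if_neg he, PySem.Dict.getD_modify, if_neg he]
    · have hcnt : pvCnt (w :: t) ch = pvCnt t ch := by
        have hin' : PySem.Chars.isIn ch.toList w.toList ≠ true := by simpa using hin
        simp [pvCnt, hin']
      rw [if_neg hin, hcnt]

theorem pvA_inner_keys (ws : List String) (ch : String) (d : PySem.Dict String Int)
    (hch : ch ∈ d.keys) :
    (ws.foldl (fun d word => if PySem.Str.isIn ch word then d.modify ch 0 (· + 1) else d) d).keys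
      = d.keys := by
  induction ws generalizing d with
  | nil => rfl
  | cons w t ih =>
    simp only [List.foldl_cons]
    by_cases hin : PySem.Str.isIn ch w
    · have hc : d.contains ch = true := (PySem.Dict.contains_iff_mem_keys d ch).2 hch
      have hk : (d.modify ch 0 (· + 1)).keys = d.keys := by
        rw [PySem.Dict.keys_modify, PySem.Dict.keys_insert_of_contains _ _ hc]
      rw [hin]
      simp only [if_true]
      rw [ih _ (by rw [hk]; exact hch), hk]
    · simp only [hin]
      exact ih d hch

-- keys of a single insert, as a Set.add
theorem pv_keys_insert (d : PySem.Dict String Int) (ch : String) (v : Int) :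
    (d.insert ch v).keys = PySem.Set.add d.keys ch := by
  by_cases hcont : d.contains ch = true
  · rw [PySem.Dict.keys_insert_of_contains _ _ hcont,
        PySem.Set.add_of_mem ((PySem.Dict.contains_iff_mem_keys d ch).1 hcont)]
  · rw [PySem.Dict.keys_insert_of_not_contains _ _ (by simpa using hcont),
        PySem.Set.add_of_not_mem (fun hmem => hcont ((PySem.Dict.contains_iff_mem_keys d ch).2 hmem))]

-- A's outer loop leaves the entry of a key not in the remaining list alone
theorem pvA_stable (ws : List String) (t : List String) (c : String) (ht : c ∉ t) :
    ∀ d : PySem.Dict String Int,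
      ((t.foldl (fun d char =>
          ws.foldl (fun d word => if PySem.Str.isIn char word then d.modify char 0 (· + 1) else d)
            (d.insert char 0)) d).getD c 0) = d.getD c 0 := by
  induction t with
  | nil => intro d; rfl
  | cons ch2 t2 ih =>
    intro d
    have hne : c ≠ ch2 := by intro h; exact ht (by simp [h])
    rw [List.foldl_cons, ih (fun h => ht (List.mem_cons_of_mem _ h)), pvA_inner_getD]
    simp [hne, PySem.Dict.getD_insert]

-- A's outer loop, value part
theorem pvA_getD (ws : List String) (l : List String) (d : PySem.Dict String Int) (c : String)
    (hc : c ∈ l) :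
    (l.foldl (fun d char =>
        ws.foldl (fun d word => if PySem.Str.isIn char word then d.modify char 0 (· + 1) else d)
          (d.insert char 0)) d).getD c 0 = pvCnt ws c := by
  induction l generalizing d with
  | nil => cases hc
  | cons ch t ih =>
    rw [List.foldl_cons]
    by_cases ht : c ∈ t
    · exact ih _ ht
    · have hceq : c = ch := (List.mem_cons.mp hc).resolve_right ht
      subst hceq
      rw [pvA_stable ws t c ht, pvA_inner_getD]
      simp

-- A's outer loop, keys part
theorem pvA_keys (ws : List String) (l : List String) (d : PySem.Dict String Int) :
    (l.foldl (fun d char =>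
        ws.foldl (fun d word => if PySem.Str.isIn char word then d.modify char 0 (· + 1) else d)
          (d.insert char 0)) d).keys = PySem.Set.update d.keys l := by
  induction l generalizing d with
  | nil => rfl
  | cons ch t ih =>
    rw [List.foldl_cons, ih, pvA_inner_keys]
    · rw [pv_keys_insert]
      rfl
    · exact (PySem.Dict.mem_keys_insert _ _ _ _).2 (Or.inl rfl)

-- sum of an indicator over a nodup list
theorem pv_sum_indicator (l : List String) (v : String) (hl : l.Nodup) :
    (l.map (fun w => if v = w then (1 : Int) else 0)).sum = if v ∈ l then 1 else 0 := by
  induction l with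
  | nil => simp
  | cons a t ih =>
    rw [List.nodup_cons] at hl
    rw [List.map_cons, List.sum_cons, ih hl.2]
    by_cases he : v = a
    · subst he; simp [hl.1]
    · simp [he]

-- splitting a sum of pointwise sums
theorem pv_sum_map_add (l : List String) (f g : String → Int) :
    (l.map (fun w => f w + g w)).sum = (l.map f).sum + (l.map g).sum := by
  induction l with
  | nil => simp
  | cons a t ih => simp [ih]; ring

-- multiplicity-weighted count over a covering nodup list = plain filtered length
theorem pv_sum_count (ws : List String) (l : List String) (q : String → Bool) (hl : l.Nodup)
    (h : ∀ w ∈ ws, w ∈ l) :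
    ((l.filter q).map (fun w => ((ws.count w : Nat) : Int))).sum = ((ws.filter q).length : Int) := by
  induction ws with
  | nil => simp
  | cons v t ih =>
    have hcnt : ∀ w : String, (((v :: t).count w : Nat) : Int)
        = ((t.count w : Nat) : Int) + (if w = v then (1 : Int) else 0) := by
      intro w
      rw [List.count_cons]
      by_cases he : w = v
      · simp [he]
      · have he' : ¬ v = w := fun h => he h.symm
        simp [he, he']
    calc ((l.filter q).map (fun w => (((v :: t).count w : Nat) : Int))).sum
        = ((l.filter q).map (fun w => ((t.count w : Nat) : Int) + (if w = v then (1:Int) else 0))).sum := by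
          exact congrArg List.sum (List.map_congr_left (fun w _ => hcnt w))
      _ = ((l.filter q).map (fun w => ((t.count w : Nat) : Int))).sum
            + ((l.filter q).map (fun w => if v = w then (1:Int) else 0)).sum := by
          rw [pv_sum_map_add]
          congr 1
          exact congrArg List.sum (List.map_congr_left (fun w _ => by
            by_cases he : w = v
            · simp [he]
            · rw [if_neg he, if_neg (fun h : v = w => he h.symm)]))
      _ = ((t.filter q).length : Int) + (if v ∈ l.filter q then 1 else 0) := by
          rw [ih (fun w hw => h w (List.mem_cons_of_mem _ hw)),
              pv_sum_indicator _ _ (List.Nodup.filter q hl)]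
      _ = (((v :: t).filter q).length : Int) := by
          have hv : v ∈ l := h v (List.mem_cons_self ..)
          rw [List.filter_cons]
          by_cases hq : q v = true
          · simp [hq, List.mem_filter, hv]
          · simp [hq, List.mem_filter]

-- running sum of second components
theorem pv_foldl_add_snd (l : List (String × Int)) (a : Int) :
    l.foldl (fun acc p => acc + p.2) a = a + (l.map (fun p => p.2)).sum := by
  induction l generalizing a with
  | nil => simp
  | cons p t ih => simp [ih]; ring

-- B's per-key value: the weighted sum over the multiplicity map's items is pvCnt
theorem pvB_val (ws : List String) (ch : String) :
    ((ws.foldl (fun d w => d.insert w (d.getD w 0 + 1)) PySem.Dict.empty).items.foldl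
        (fun acc p => if PySem.Str.isIn ch p.1 then acc + p.2 else acc) 0) = pvCnt ws ch := by
  rw [PySem.Dict.foldl_insert_getD_add_one_eq_counter, PySem.Dict.items_counter,
      PySem.List.foldl_if_eq_foldl_filter, pv_foldl_add_snd,
      List.filter_map, List.map_map]
  have : ((PySem.Set.ofList ws).filter
        ((fun p : String × Int => PySem.Str.isIn ch p.1) ∘ fun k => (k, (ws.count k : Int)))).map
        ((fun p : String × Int => p.2) ∘ fun k => (k, (ws.count k : Int)))
      = ((PySem.Set.ofList ws).filter (fun w => PySem.Str.isIn ch w)).map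
        (fun w => ((ws.count w : Nat) : Int)) := rfl
  rw [this, pv_sum_count ws (PySem.Set.ofList ws) _ (PySem.Set.nodup_ofList ws)
      (fun w hw => (PySem.Set.mem_ofList _ _).2 hw)]
  simp [pvCnt]

-- B's freq loop (value function independent of the dict)
theorem pvB_freq_getD (v : String → Int) (l : List String) (d : PySem.Dict String Int) (c : String) :
    (l.foldl (fun d ch => d.insert ch (v ch)) d).getD c 0
      = if c ∈ l then v c else d.getD c 0 := by
  induction l generalizing d with
  | nil => simp
  | cons ch t ih =>
    rw [List.foldl_cons, ih]
    by_cases ht : c ∈ t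
    · simp [ht]
    · by_cases he : c = ch
      · subst he; simp [ht]
      · simp [ht, he, PySem.Dict.getD_insert]

-- B's freq keys
theorem pvB_freq_keys (v : String → Int) (u : List String) :
    ((PySem.List.dedup u).foldl (fun d ch => d.insert ch (v ch))
        (PySem.Dict.empty : PySem.Dict String Int)).keys = PySem.List.dedup u := by
  rw [PySem.Dict.keys_foldl_insert (f := fun _ ch => v ch)]
  rw [PySem.Dict.keys_empty, PySem.Set.update_nil_left, PySem.List.dedup_eq_ofList,
      PySem.Set.ofList_ofList]

-- the two dicts are equal
theorem pv_dict_eq (sol_space : List String) (unguessed : List String) :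
    (unguessed.foldl (fun d char =>
        sol_space.foldl (fun d word => if PySem.Str.isIn char word then d.modify char 0 (· + 1) else d)
          (d.insert char 0)) (PySem.Dict.empty : PySem.Dict String Int))
    = ((PySem.List.dedup unguessed).foldl (fun d ch =>
        d.insert ch
          ((sol_space.foldl (fun d w => d.insert w (d.getD w 0 + 1)) PySem.Dict.empty).items.foldl
            (fun acc p => if PySem.Str.isIn ch p.1 then acc + p.2 else acc) 0))
        PySem.Dict.empty) := by
  set keys := PySem.List.dedup unguessed with hkeys
  have hnd : keys.Nodup := PySem.List.nodup_dedup unguessed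
  have hAk : (unguessed.foldl (fun d char =>
        sol_space.foldl (fun d word => if PySem.Str.isIn char word then d.modify char 0 (· + 1) else d)
          (d.insert char 0)) (PySem.Dict.empty : PySem.Dict String Int)).keys = keys := by
    rw [pvA_keys]
    simp [hkeys, PySem.Dict.keys_empty]
    rfl
  have hBk := pvB_freq_keys (fun ch =>
      ((sol_space.foldl (fun d w => d.insert w (d.getD w 0 + 1)) PySem.Dict.empty).items.foldl
        (fun acc p => if PySem.Str.isIn ch p.1 then acc + p.2 else acc) 0)) unguessed
  rw [← hkeys] at hBk
  have hndA := hAk ▸ hnd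
  have hndB := hBk ▸ hnd
  apply PySem.Dict.ext
  rw [PySem.Dict.items_eq_map_keys _ hndA 0,
      PySem.Dict.items_eq_map_keys _ hndB 0, hAk, hBk]
  apply List.map_congr_left
  intro c hcmem
  have hcu : c ∈ unguessed := (PySem.List.mem_dedup _ _).1 (hkeys ▸ hcmem)
  rw [pvA_getD _ _ _ _ hcu, pvB_freq_getD]
  rw [if_pos (hkeys ▸ hcmem), pvB_val]

-- ===== VERDICT (by name: the statement is the Claim_ definition above) =====
theorem generate_char_candidates_spec : Claim_equal_generate_char_candidates := by
  intro sol_space unguessed _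
  unfold Spec_generate_char_candidates generate_char_candidates generate_char_candidates_alt
  simp only []
  rw [pv_dict_eq sol_space unguessed]
  congr 1
  exact pvB_freq_keys _ unguessed
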